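-- pv_equiv track=rewrite | github.com/N1qro/AssignmentTesterForAICourse | tester.py | moore_square
-- ===== SOURCE A (Python) =====
-- from typing import List, Tuple, Dict, Set
--
-- WIDTH = HEIGHT = 13
--
-- WIDTH = HEIGHT = 13
--
-- def in_bounds(x:int,y:int)->bool:
--     return 0 <= x < HEIGHT and 0 <= y < WIDTH
--
-- def moore_square(x:int,y:int,r:int)->List[Tuple[int,int]]:
--     cells = []
--     for dx in range(-r, r+1):
--         for dy in range(-r, r+1):
--             nx, ny = x+dx, y+dy
--             if in_bounds(nx, ny):
--                 cells.append((nx, ny))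
--     return cells
-- ===== SOURCE B (Python) =====
-- WIDTH = HEIGHT = 13
--
-- def moore_square(x: int, y: int, r: int):
--     x_lo, x_hi = max(0, x - r), min(HEIGHT - 1, x + r)
--     y_lo, y_hi = max(0, y - r), min(WIDTH - 1, y + r)
--     return [(nx, ny) for nx in range(x_lo, x_hi + 1)
--                      for ny in range(y_lo, y_hi + 1)]
-- ===== Notes on version B (the rewrite author's own statement) =====
-- stated objective: faster
-- what changed: B clips the coordinate ranges to the grid up front (max/min) and emits all cells with a single comprehension, so the per-cell in_bounds test disappears and the loop never visits off-grid offsets: O(output) instead of O(r^2).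
import Mathlib
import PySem

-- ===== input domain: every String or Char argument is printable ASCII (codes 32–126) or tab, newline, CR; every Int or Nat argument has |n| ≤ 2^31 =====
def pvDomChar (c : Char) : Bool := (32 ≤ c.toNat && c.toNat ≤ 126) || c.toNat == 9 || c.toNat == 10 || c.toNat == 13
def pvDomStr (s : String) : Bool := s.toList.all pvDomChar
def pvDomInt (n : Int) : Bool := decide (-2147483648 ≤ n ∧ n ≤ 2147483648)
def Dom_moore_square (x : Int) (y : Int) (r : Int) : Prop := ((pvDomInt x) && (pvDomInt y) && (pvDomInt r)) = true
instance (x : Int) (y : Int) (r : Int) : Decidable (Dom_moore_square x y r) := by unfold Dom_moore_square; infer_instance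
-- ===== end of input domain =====

-- B clips the coordinate ranges to the grid up front and emits all cells without a per-cell bounds check, never visiting off-grid offsets (objective: faster, measured).

-- ===== PORT A =====
def in_bounds (x : Int) (y : Int) : Bool :=
  decide (0 ≤ x ∧ x < 13) && decide (0 ≤ y ∧ y < 13)

def moore_square (x : Int) (y : Int) (r : Int) : List (Int × Int) :=
  (PySem.List.pyRange (-r) (r + 1) 1).foldl (fun cells dx =>
    (PySem.List.pyRange (-r) (r + 1) 1).foldl (fun cells dy =>
      let nx := x + dx
      let ny := y + dy
      if in_bounds nx ny then cells ++ [(nx, ny)] else cells) cells) []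

-- ===== PORT B =====
def moore_square_alt (x : Int) (y : Int) (r : Int) : List (Int × Int) :=
  let xlo := max 0 (x - r)
  let xhi := min 12 (x + r)
  let ylo := max 0 (y - r)
  let yhi := min 12 (y + r)
  (PySem.List.pyRange xlo (xhi + 1) 1).flatMap (fun nx =>
    (PySem.List.pyRange ylo (yhi + 1) 1).map (fun ny => (nx, ny)))

-- ===== PRECONDITION & SPEC =====
def Spec_moore_square (x : Int) (y : Int) (r : Int) (out : List (Int × Int)) : Prop := out = moore_square_alt x y r
instance (x : Int) (y : Int) (r : Int) (out : List (Int × Int)) : Decidable (Spec_moore_square x y r out) := by unfold Spec_moore_square; infer_instance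

-- ===== CLAIM (what is proved, stated in full; the proofs are below) =====
def Claim_equal_moore_square : Prop := ∀ (x : Int) (y : Int) (r : Int), Dom_moore_square x y r → Spec_moore_square x y r (moore_square x y r)

-- ===== LEMMAS AND PROOFS =====

-- shifting an integer range
theorem pv_map_add_pyRange (c a b : Int) :
    (PySem.List.pyRange a b 1).map (fun t => c + t) = PySem.List.pyRange (c + a) (c + b) 1 := by
  rw [PySem.List.pyRange_one, PySem.List.pyRange_one, List.map_map]
  have h : c + b - (c + a) = b - a := by ring
  rw [h]
  congr 1
  funext k
  simp [Function.comp]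
  ring

-- clipping: filtering a range by an interval is the clipped range
theorem pv_filter_interval (lo hi : Int) :
    ∀ (n : Nat) (a b : Int), (b - a).toNat = n →
      (PySem.List.pyRange a b 1).filter (fun t => decide (lo ≤ t ∧ t < hi))
        = PySem.List.pyRange (max a lo) (min b hi) 1 := by
  intro n
  induction n with
  | zero =>
    intro a b h
    rw [PySem.List.pyRange_one_eq_nil (by omega), PySem.List.pyRange_one_eq_nil (by omega)]
    rfl
  | succ m ih =>
    intro a b h
    rw [PySem.List.pyRange_one_cons (by omega), List.filter_cons]
    by_cases hin : lo ≤ a ∧ a < hi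
    · rw [if_pos (by simpa using hin), ih (a + 1) b (by omega)]
      rw [PySem.List.pyRange_one_cons (show max a lo < min b hi by omega)]
      have h1 : max a lo = a := by omega
      have h2 : max (a + 1) lo = a + 1 := by omega
      rw [h1, h2]
    · rw [if_neg (by simpa using hin), ih (a + 1) b (by omega)]
      rcases (not_and_or.mp hin) with hlt | hge
      · have : max (a + 1) lo = max a lo := by omega
        rw [this]
      · rw [PySem.List.pyRange_one_eq_nil (by omega), PySem.List.pyRange_one_eq_nil (by omega)]

theorem pv_flatMap_congr {α β : Type} (l : List α) (f g : α → List β)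
    (h : ∀ t ∈ l, f t = g t) : l.flatMap f = l.flatMap g := by
  induction l with
  | nil => rfl
  | cons hd tl ih =>
    simp only [List.flatMap_cons, h hd (List.mem_cons_self), ih (fun t ht => h t (List.mem_cons_of_mem _ ht))]

theorem pv_flatMap_filter {α β : Type} (l : List α) (p : α → Bool) (g : α → List β)
    (h : ∀ t ∈ l, p t = false → g t = []) : l.flatMap g = (l.filter p).flatMap g := by
  induction l with
  | nil => rfl
  | cons hd tl ih =>
    rw [List.flatMap_cons, List.filter_cons]
    have ih' := ih (fun t ht hp => h t (List.mem_cons_of_mem _ ht) hp)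
    cases hp : p hd with
    | true => simp [ih']
    | false => simp [h hd List.mem_cons_self hp, ih']

theorem pv_flatMap_shift {β : Type} (c a b : Int) (F : Int → List β) :
    (PySem.List.pyRange a b 1).flatMap (fun t => F (c + t))
      = (PySem.List.pyRange (c + a) (c + b) 1).flatMap F := by
  rw [← pv_map_add_pyRange, List.flatMap_map]

theorem moore_square_spec' (x y r : Int) : moore_square x y r = moore_square_alt x y r := by
  unfold moore_square moore_square_alt
  -- turn A's loops into flatMap/filter/map
  simp only [PySem.List.foldl_append_if, PySem.List.foldl_append_eq_flatMap, List.nil_append]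
  -- shift the outer loop: dx ↦ nx = x + dx
  refine Eq.trans (pv_flatMap_shift x (-r) (r + 1) (fun nx =>
    ((PySem.List.pyRange (-r) (r + 1) 1).filter (fun dy => in_bounds nx (y + dy))).map
      (fun dy => (nx, y + dy)))) ?_
  -- shift the inner loop: dy ↦ ny = y + dy
  have step1 : ∀ nx : Int,
      ((PySem.List.pyRange (-r) (r + 1) 1).filter (fun dy => in_bounds nx (y + dy))).map
          (fun dy => (nx, y + dy))
        = ((PySem.List.pyRange (y + -r) (y + (r + 1)) 1).filter (fun ny => in_bounds nx ny)).map
            (fun ny => (nx, ny)) := by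
    intro nx
    rw [← pv_map_add_pyRange y (-r) (r + 1), List.filter_map, List.map_map]
    rfl
  simp only [step1]
  -- drop out-of-bounds rows: nx with ¬(0 ≤ nx < 13) contribute nothing
  rw [pv_flatMap_filter _ (fun nx => decide (0 ≤ nx ∧ nx < 13)) _ (by
    intro nx _ hnx
    rw [List.map_eq_nil_iff, List.filter_eq_nil_iff]
    intro ny _
    simp only [decide_eq_false_iff_not] at hnx
    simp only [in_bounds, Bool.and_eq_true, decide_eq_true_eq, not_and]
    intro h _
    exact absurd h hnx)]
  rw [pv_filter_interval 0 13 (x + (r + 1) - (x + -r)).toNat (x + -r) (x + (r + 1)) rfl]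
  -- identical row contents for every in-range nx
  rw [pv_flatMap_congr _ _ (fun nx =>
      (PySem.List.pyRange (max 0 (y - r)) (min 12 (y + r) + 1) 1).map (fun ny => (nx, ny))) (by
    intro nx hnx
    rw [PySem.List.mem_pyRange_one] at hnx
    have hx : (0:Int) ≤ nx ∧ nx < 13 := by constructor <;> omega
    have hfe : (fun ny => in_bounds nx ny) = (fun ny => decide (0 ≤ ny ∧ ny < 13)) := by
      funext ny
      simp [in_bounds, hx.1, hx.2]
    rw [hfe, pv_filter_interval 0 13 (y + (r + 1) - (y + -r)).toNat (y + -r) (y + (r + 1)) rfl]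
    have h1 : max (y + -r) 0 = max 0 (y - r) := by omega
    have h2 : min (y + (r + 1)) 13 = min 12 (y + r) + 1 := by omega
    rw [h1, h2])]
  have h1 : max (x + -r) 0 = max 0 (x - r) := by omega
  have h2 : min (x + (r + 1)) 13 = min 12 (x + r) + 1 := by omega
  rw [h1, h2]

-- ===== VERDICT (by name: the statement is the Claim_ definition above) =====
theorem moore_square_spec : Claim_equal_moore_square := by
  intro x y r _
  exact moore_square_spec' x y r
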